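-- pv_equiv track=rewrite | github.com/26zl/cybersec-toolkit | mcp_server/tools_db.py | _find_docker_image
-- ===== SOURCE A (Python) =====
-- from typing import Optional
--
-- DOCKER_IMAGES: dict[str, str] = {
--     "BeEF": "beefproject/beef",
--     "Empire": "bcsecurity/empire",
--     "MobSF": "opensecurity/mobile-security-framework-mobsf",
--     "SpiderFoot": "spiderfoot/spiderfoot",
--     "BloodHound CE": "specterops/bloodhound",
--     "TheHive": "strangebee/thehive:latest",
--     "Cortex": "thehiveproject/cortex:latest",
--     "Echidna": "trailofbits/echidna",
--     "PentAGI": "vxcontrol/pentagi:latest",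
-- }
--
-- def _find_docker_image(tool_name: str) -> Optional[str]:
--     """Find the docker image for a tool name."""
--     name_lower = tool_name.lower()
--     # Exact match on label (case-insensitive)
--     for label, image in DOCKER_IMAGES.items():
--         if name_lower == label.lower():
--             return image
--     # Exact match on image name (last component, strip tag, e.g. "empire" from "bcsecurity/empire")
--     for label, image in DOCKER_IMAGES.items():
--         image_name = image.rsplit("/", 1)[-1].split(":")[0].lower()
--         if name_lower == image_name:
--             return image
--     return None
-- ===== SOURCE B (Python) =====
-- from typing import Optional
--
-- DOCKER_IMAGES: dict[str, str] = {
--     "BeEF": "beefproject/beef",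
--     "Empire": "bcsecurity/empire",
--     "MobSF": "opensecurity/mobile-security-framework-mobsf",
--     "SpiderFoot": "spiderfoot/spiderfoot",
--     "BloodHound CE": "specterops/bloodhound",
--     "TheHive": "strangebee/thehive:latest",
--     "Cortex": "thehiveproject/cortex:latest",
--     "Echidna": "trailofbits/echidna",
--     "PentAGI": "vxcontrol/pentagi:latest",
-- }
--
--
-- def _image_key(image: str) -> str:
--     return image.rsplit("/", 1)[-1].split(":")[0].lower()
--
--
-- def _build_lookup() -> dict[str, str]:
--     image_name_map: dict[str, str] = {}
--     label_map: dict[str, str] = {}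
--     for label, image in DOCKER_IMAGES.items():
--         image_name_map.setdefault(_image_key(image), image)
--         label_map.setdefault(label.lower(), image)
--     # label matches take priority over image-name matches
--     return {**image_name_map, **label_map}
--
--
-- _LOOKUP = _build_lookup()
--
--
-- def _find_docker_image(tool_name: str) -> Optional[str]:
--     """Find the docker image for a tool name."""
--     return _LOOKUP.get(tool_name.lower())
-- ===== Notes on version B (the rewrite author's own statement) =====
-- stated objective: idiomatic
-- what changed: Instead of scanning the DOCKER_IMAGES dict twice per call (labels first, then derived image names), B precomputes once a single merged lookup table keyed by lowercased image name and lowercased label (labels overriding, first entry winning within each category) and answers each query with one dict.get.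
import Mathlib
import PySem

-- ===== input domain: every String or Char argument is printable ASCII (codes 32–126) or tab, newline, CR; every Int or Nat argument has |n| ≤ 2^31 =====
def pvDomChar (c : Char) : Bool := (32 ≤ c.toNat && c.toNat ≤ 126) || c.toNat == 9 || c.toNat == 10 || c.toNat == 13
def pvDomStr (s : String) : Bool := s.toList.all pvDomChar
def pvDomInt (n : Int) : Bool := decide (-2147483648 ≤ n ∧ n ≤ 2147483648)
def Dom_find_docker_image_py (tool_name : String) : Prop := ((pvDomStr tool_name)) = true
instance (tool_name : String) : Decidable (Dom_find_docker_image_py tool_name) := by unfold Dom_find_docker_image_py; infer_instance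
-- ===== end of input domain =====

-- B replaces A's two linear scans per query by a lookup table built once (image-name keys, label keys overriding); objective: idiomatic.


-- ===== PORT A =====
def dockerImages : List (String × String) :=
  [("BeEF", "beefproject/beef"),
   ("Empire", "bcsecurity/empire"),
   ("MobSF", "opensecurity/mobile-security-framework-mobsf"),
   ("SpiderFoot", "spiderfoot/spiderfoot"),
   ("BloodHound CE", "specterops/bloodhound"),
   ("TheHive", "strangebee/thehive:latest"),
   ("Cortex", "thehiveproject/cortex:latest"),
   ("Echidna", "trailofbits/echidna"),
   ("PentAGI", "vxcontrol/pentagi:latest")]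

-- image.rsplit("/", 1)[-1].split(":")[0].lower(), ported by hand (exact: the separators are single ASCII
-- chars, so rsplit("/", 1)[-1] is the suffix after the last '/' and split(":")[0] the prefix before the first ':')
def imageKey (image : String) : String :=
  String.ofList (PySem.Chars.lower (((image.toList.reverse.takeWhile (· ≠ '/')).reverse).takeWhile (· ≠ ':')))

def find_docker_image_py (tool_name : String) : Option String :=
  let name_lower := PySem.Str.lower tool_name
  -- first loop: exact match on label (case-insensitive); for-with-return = List.find?
  match dockerImages.find? (fun li => name_lower == PySem.Str.lower li.1) with
  | some (_, image) => some image
  | none =>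
    -- second loop: exact match on image name (last component, tag stripped)
    match dockerImages.find? (fun li => name_lower == imageKey li.2) with
    | some (_, image) => some image
    | none => none

-- ===== PORT B =====
-- _build_lookup(): two first-wins maps (setdefault), merged as {**image_name_map, **label_map}
def lookupMap : PySem.Dict String String :=
  let image_name_map := dockerImages.foldl
    (fun d li => if d.contains (imageKey li.2) then d else d.insert (imageKey li.2) li.2)
    PySem.Dict.empty
  let label_map := dockerImages.foldl
    (fun d li => if d.contains (PySem.Str.lower li.1) then d else d.insert (PySem.Str.lower li.1) li.2)
    PySem.Dict.empty
  label_map.items.foldl (fun d kv => d.insert kv.1 kv.2) image_name_map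

def find_docker_image_py_alt (tool_name : String) : Option String :=
  lookupMap.get? (PySem.Str.lower tool_name)

-- ===== PRECONDITION & SPEC =====
def Spec_find_docker_image_py (tool_name : String) (out : Option String) : Prop := out = find_docker_image_py_alt tool_name
instance (tool_name : String) (out : Option String) : Decidable (Spec_find_docker_image_py tool_name out) := by unfold Spec_find_docker_image_py; infer_instance

-- ===== CLAIM (what is proved, stated in full; the proofs are below) =====
def Claim_equal_find_docker_image_py : Prop := ∀ (tool_name : String), Dom_find_docker_image_py tool_name → Spec_find_docker_image_py tool_name (find_docker_image_py tool_name)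

-- ===== LEMMAS AND PROOFS =====
theorem lookupMap_eq : lookupMap = PySem.Dict.mk
  [("beef", "beefproject/beef"), ("empire", "bcsecurity/empire"),
   ("mobile-security-framework-mobsf", "opensecurity/mobile-security-framework-mobsf"),
   ("spiderfoot", "spiderfoot/spiderfoot"), ("bloodhound", "specterops/bloodhound"),
   ("thehive", "strangebee/thehive:latest"), ("cortex", "thehiveproject/cortex:latest"),
   ("echidna", "trailofbits/echidna"), ("pentagi", "vxcontrol/pentagi:latest"),
   ("mobsf", "opensecurity/mobile-security-framework-mobsf"),
   ("bloodhound ce", "specterops/bloodhound")] := by decide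
theorem key_eq (k : String) :
    (match dockerImages.find? (fun li => k == PySem.Str.lower li.1) with
     | some (_, image) => some image
     | none =>
       match dockerImages.find? (fun li => k == imageKey li.2) with
       | some (_, image) => some image
       | none => none) = lookupMap.get? k := by
  rw [lookupMap_eq]
  have a1 : PySem.Str.lower "BeEF" = "beef" := by decide
  have a2 : PySem.Str.lower "Empire" = "empire" := by decide
  have a3 : PySem.Str.lower "MobSF" = "mobsf" := by decide
  have a4 : PySem.Str.lower "SpiderFoot" = "spiderfoot" := by decide
  have a5 : PySem.Str.lower "BloodHound CE" = "bloodhound ce" := by decide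
  have a6 : PySem.Str.lower "TheHive" = "thehive" := by decide
  have a7 : PySem.Str.lower "Cortex" = "cortex" := by decide
  have a8 : PySem.Str.lower "Echidna" = "echidna" := by decide
  have a9 : PySem.Str.lower "PentAGI" = "pentagi" := by decide
  have b1 : imageKey "beefproject/beef" = "beef" := by decide
  have b2 : imageKey "bcsecurity/empire" = "empire" := by decide
  have b3 : imageKey "opensecurity/mobile-security-framework-mobsf" = "mobile-security-framework-mobsf" := by decide
  have b4 : imageKey "spiderfoot/spiderfoot" = "spiderfoot" := by decide
  have b5 : imageKey "specterops/bloodhound" = "bloodhound" := by decide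
  have b6 : imageKey "strangebee/thehive:latest" = "thehive" := by decide
  have b7 : imageKey "thehiveproject/cortex:latest" = "cortex" := by decide
  have b8 : imageKey "trailofbits/echidna" = "echidna" := by decide
  have b9 : imageKey "vxcontrol/pentagi:latest" = "pentagi" := by decide
  simp only [dockerImages, List.find?, PySem.Dict.get?_mk_cons,
    a1, a2, a3, a4, a5, a6, a7, a8, a9, b1, b2, b3, b4, b5, b6, b7, b8, b9]
  by_cases h1 : k = "beef"
  · simp [h1]
  by_cases h2 : k = "empire"
  · simp [h2]
  by_cases h3 : k = "mobsf"
  · simp [h3]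
  by_cases h4 : k = "spiderfoot"
  · simp [h4]
  by_cases h5 : k = "bloodhound ce"
  · simp [h5]
  by_cases h6 : k = "thehive"
  · simp [h6]
  by_cases h7 : k = "cortex"
  · simp [h7]
  by_cases h8 : k = "echidna"
  · simp [h8]
  by_cases h9 : k = "pentagi"
  · simp [h9]
  by_cases h10 : k = "mobile-security-framework-mobsf"
  · simp [h10]
  by_cases h11 : k = "bloodhound"
  · simp [h11]
  have e1 : (k == "beef") = false := beq_eq_false_iff_ne.mpr h1
  have f1 : ("beef" == k) = false := beq_eq_false_iff_ne.mpr (Ne.symm h1)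
  have e2 : (k == "empire") = false := beq_eq_false_iff_ne.mpr h2
  have f2 : ("empire" == k) = false := beq_eq_false_iff_ne.mpr (Ne.symm h2)
  have e3 : (k == "mobsf") = false := beq_eq_false_iff_ne.mpr h3
  have f3 : ("mobsf" == k) = false := beq_eq_false_iff_ne.mpr (Ne.symm h3)
  have e4 : (k == "spiderfoot") = false := beq_eq_false_iff_ne.mpr h4
  have f4 : ("spiderfoot" == k) = false := beq_eq_false_iff_ne.mpr (Ne.symm h4)
  have e5 : (k == "bloodhound ce") = false := beq_eq_false_iff_ne.mpr h5
  have f5 : ("bloodhound ce" == k) = false := beq_eq_false_iff_ne.mpr (Ne.symm h5)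
  have e6 : (k == "thehive") = false := beq_eq_false_iff_ne.mpr h6
  have f6 : ("thehive" == k) = false := beq_eq_false_iff_ne.mpr (Ne.symm h6)
  have e7 : (k == "cortex") = false := beq_eq_false_iff_ne.mpr h7
  have f7 : ("cortex" == k) = false := beq_eq_false_iff_ne.mpr (Ne.symm h7)
  have e8 : (k == "echidna") = false := beq_eq_false_iff_ne.mpr h8
  have f8 : ("echidna" == k) = false := beq_eq_false_iff_ne.mpr (Ne.symm h8)
  have e9 : (k == "pentagi") = false := beq_eq_false_iff_ne.mpr h9
  have f9 : ("pentagi" == k) = false := beq_eq_false_iff_ne.mpr (Ne.symm h9)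
  have e10 : (k == "mobile-security-framework-mobsf") = false := beq_eq_false_iff_ne.mpr h10
  have f10 : ("mobile-security-framework-mobsf" == k) = false := beq_eq_false_iff_ne.mpr (Ne.symm h10)
  have e11 : (k == "bloodhound") = false := beq_eq_false_iff_ne.mpr h11
  have f11 : ("bloodhound" == k) = false := beq_eq_false_iff_ne.mpr (Ne.symm h11)
  simp [PySem.Dict.get?, e1, e2, e3, e4, e5, e6, e7, e8, e9, e10, e11, f1, f2, f3, f4, f5, f6, f7, f8, f9, f10, f11]

-- ===== VERDICT (by name: the statement is the Claim_ definition above) =====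
theorem find_docker_image_py_spec : Claim_equal_find_docker_image_py := by
  intro tool_name _
  unfold Spec_find_docker_image_py find_docker_image_py find_docker_image_py_alt
  exact key_eq (PySem.Str.lower tool_name)
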